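-- pv_equiv track=rewrite | github.com/xiaobingling93-pixel/Ascend-mind-cluster | component/ascend-faultdiag/toolkits/top3_root_sort/chain_complete.py | match_function
-- ===== SOURCE A (Python) =====
-- def match_function(regex_list: list, json_data: dict) -> tuple:
--     for f_path, v in json_data.items():
--         functions_info = v.get('functions', {})
--         for f_name, f_info in functions_info.items():
--             f_code = f_info.get('code', '')
--             count = 0
--             for regex in regex_list:
--                 if regex not in f_code:
--                     break
--                 else:
--                     count += 1
--             if len(regex_list) == count:
--                 return (f_path, f_name)
--     return ('', '')
-- ===== SOURCE B (Python) =====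
-- def match_function(regex_list: list, json_data: dict) -> tuple:
--     # Pattern-major filtering: flatten candidates once, then each pattern
--     # prunes the survivor pool; the first survivor is the answer.
--     survivors = [
--         (f_path, f_name, f_info.get('code', ''))
--         for f_path, v in json_data.items()
--         for f_name, f_info in v.get('functions', {}).items()
--     ]
--     for regex in regex_list:
--         survivors = [t for t in survivors if regex in t[2]]
--         if not survivors:
--             return ('', '')
--     return (survivors[0][0], survivors[0][1]) if survivors else ('', '')
-- ===== Notes on version B (the rewrite author's own statement) =====
-- stated objective: alternative
-- what changed: Swaps the loop nesting: instead of A's per-candidate inner scan counting patterns, B flattens the dicts into one candidate list and loops over the patterns, each pass filtering the shrinking survivor pool (with early exit when it empties); the first survivor is the answer.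
import Mathlib
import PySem

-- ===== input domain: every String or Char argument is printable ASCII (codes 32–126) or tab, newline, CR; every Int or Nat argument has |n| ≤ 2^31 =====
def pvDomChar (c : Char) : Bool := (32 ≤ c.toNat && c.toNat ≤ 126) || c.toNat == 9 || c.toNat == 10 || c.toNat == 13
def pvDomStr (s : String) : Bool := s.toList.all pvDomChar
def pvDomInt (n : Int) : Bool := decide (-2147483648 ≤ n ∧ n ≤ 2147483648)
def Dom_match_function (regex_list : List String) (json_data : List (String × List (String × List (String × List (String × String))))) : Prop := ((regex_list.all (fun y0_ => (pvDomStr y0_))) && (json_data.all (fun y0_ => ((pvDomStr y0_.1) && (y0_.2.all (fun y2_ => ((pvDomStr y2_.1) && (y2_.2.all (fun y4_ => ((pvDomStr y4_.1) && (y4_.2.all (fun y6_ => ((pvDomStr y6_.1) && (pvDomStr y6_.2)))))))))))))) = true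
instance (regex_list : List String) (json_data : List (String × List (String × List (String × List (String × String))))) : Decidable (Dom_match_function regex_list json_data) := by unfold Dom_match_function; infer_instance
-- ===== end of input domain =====

-- B swaps the loop nesting: flatten the dicts into one candidate list, then loop over the
-- PATTERNS, each pass filtering the survivor pool (early exit when empty); the first
-- survivor is the answer (objective: alternative; same worst-case cost).

-- ===== PORT A =====
-- inner 'for regex in regex_list' loop with break and count
def pvCountLoop (code : String) : List String → Int → Int
  | [], c => c
  | r :: rs, c => if PySem.Str.isIn r code then pvCountLoop code rs (c + 1) else c

-- inner 'for f_name, f_info in functions_info.items()' loop (early return as Option)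
def pvFindFn (regex_list : List String) (f_path : String) :
    List (String × List (String × String)) → Option (String × String)
  | [] => none
  | (f_name, f_info) :: rest =>
    let f_code := (PySem.Dict.mk f_info).getD "code" ""
    if (regex_list.length : Int) = pvCountLoop f_code regex_list 0 then some (f_path, f_name)
    else pvFindFn regex_list f_path rest

-- outer 'for f_path, v in json_data.items()' loop
def pvFindPath (regex_list : List String) :
    List (String × List (String × List (String × List (String × String)))) → Option (String × String)
  | [] => none
  | (f_path, v) :: rest =>
    let functions_info := (PySem.Dict.mk v).getD "functions" []
    match pvFindFn regex_list f_path functions_info with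
    | some r => some r
    | none => pvFindPath regex_list rest

def match_function (regex_list : List String) (json_data : List (String × List (String × List (String × List (String × String))))) : String × String :=
  (pvFindPath regex_list json_data).getD ("", "")

-- ===== PORT B =====
-- B's 'for regex in regex_list' loop over the survivor pool, with early return on empty
def pvBLoop : List String → List (String × String × String) → String × String
  | [], survivors =>
    match survivors with
    | [] => ("", "")
    | c :: _ => (c.1, c.2.1)
  | r :: rs, survivors =>
    let s' := survivors.filter (fun t => PySem.Str.isIn r t.2.2)
    if s'.isEmpty then ("", "") else pvBLoop rs s'

def match_function_alt (regex_list : List String) (json_data : List (String × List (String × List (String × List (String × String))))) : String × String :=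
  let survivors := json_data.flatMap (fun pv =>
    ((PySem.Dict.mk pv.2).getD "functions" []).map (fun nf =>
      (pv.1, nf.1, (PySem.Dict.mk nf.2).getD "code" "")))
  pvBLoop regex_list survivors

-- ===== PRECONDITION & SPEC =====
def Spec_match_function (regex_list : List String) (json_data : List (String × List (String × List (String × List (String × String))))) (out : String × String) : Prop := out = match_function_alt regex_list json_data
instance (regex_list : List String) (json_data : List (String × List (String × List (String × List (String × String))))) (out : String × String) : Decidable (Spec_match_function regex_list json_data out) := by unfold Spec_match_function; infer_instance

-- ===== CLAIM (what is proved, stated in full; the proofs are below) =====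
def Claim_equal_match_function : Prop := ∀ (regex_list : List String) (json_data : List (String × List (String × List (String × List (String × String))))), Dom_match_function regex_list json_data → Spec_match_function regex_list json_data (match_function regex_list json_data)

-- ===== LEMMAS AND PROOFS =====

-- A's count-with-break loop reaches the full length iff every pattern occurs
theorem pvCountLoop_eq_len_iff (code : String) (rs : List String) (c : Int) :
    ((rs.length : Int) + c = pvCountLoop code rs c) ↔ rs.all (fun r => PySem.Str.isIn r code) := by
  induction rs generalizing c with
  | nil => simp [pvCountLoop]
  | cons r rs ih =>
    simp only [pvCountLoop, List.all_cons, List.length_cons]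
    by_cases h : PySem.Str.isIn r code
    · rw [if_pos h, h]
      have := ih (c + 1)
      constructor
      · intro he; simpa using (this.mp (by push_cast at he ⊢; omega))
      · intro ha; have := this.mpr (by simpa using ha); push_cast at this ⊢; omega
    · rw [if_neg h]
      simp only [h, Bool.false_and]
      constructor
      · intro he; exfalso; push_cast at he; omega
      · intro ha; exact absurd ha (by simp)

-- inner loop of A = find? over the mapped candidate list
theorem pvFindFn_eq_find? (regex_list : List String) (f_path : String)
    (fns : List (String × List (String × String))) :
    pvFindFn regex_list f_path fns =
      ((fns.map (fun nf => (f_path, nf.1, (PySem.Dict.mk nf.2).getD "code" ""))).find?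
          (fun c => regex_list.all (fun r => PySem.Str.isIn r c.2.2))).map
        (fun c => (c.1, c.2.1)) := by
  induction fns with
  | nil => simp [pvFindFn]
  | cons nf rest ih =>
    obtain ⟨f_name, f_info⟩ := nf
    simp only [pvFindFn, List.map_cons, List.find?_cons]
    have hiff : ((regex_list.length : Int) = pvCountLoop ((PySem.Dict.mk f_info).getD "code" "") regex_list 0) ↔
        (regex_list.all (fun r => PySem.Str.isIn r ((PySem.Dict.mk f_info).getD "code" "")) = true) := by
      rw [← pvCountLoop_eq_len_iff ((PySem.Dict.mk f_info).getD "code" "") regex_list 0]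
      constructor <;> intro h <;> omega
    by_cases h : (regex_list.length : Int) = pvCountLoop ((PySem.Dict.mk f_info).getD "code" "") regex_list 0
    · have hs : (regex_list.all fun r =>
          PySem.Chars.isIn r.toList ((PySem.Dict.mk f_info).getD "code" "").toList) = true := by
        exact hiff.mp h
      simp [if_pos h, hs]
    · have hs : (regex_list.all fun r =>
          PySem.Chars.isIn r.toList ((PySem.Dict.mk f_info).getD "code" "").toList) = false := by
        exact Bool.eq_false_iff.mpr (fun hh => h (hiff.mpr hh))
      simp only [if_neg h]
      rw [ih]
      simp [hs, Option.map_map]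

-- A's outer loop = find? over the flattened candidate list
theorem pvFindPath_eq (regex_list : List String)
    (jd : List (String × List (String × List (String × List (String × String))))) :
    pvFindPath regex_list jd =
      ((jd.flatMap (fun pv =>
          ((PySem.Dict.mk pv.2).getD "functions" []).map (fun nf =>
            (pv.1, nf.1, (PySem.Dict.mk nf.2).getD "code" "")))).find?
          (fun c => regex_list.all (fun r => PySem.Str.isIn r c.2.2))).map
        (fun c => (c.1, c.2.1)) := by
  induction jd with
  | nil => simp [pvFindPath]
  | cons pv rest ih =>
    obtain ⟨f_path, v⟩ := pv
    simp only [pvFindPath, List.flatMap_cons, List.find?_append]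
    rw [pvFindFn_eq_find?, ih]
    cases h : ((((PySem.Dict.mk v).getD "functions" []).map
        (fun nf => (f_path, nf.1, (PySem.Dict.mk nf.2).getD "code" ""))).find?
        (fun c => regex_list.all (fun r => PySem.Str.isIn r c.2.2))) with
    | none => simp
    | some r => simp

-- B's staged filtering = head of the candidates filtered by ALL patterns
theorem pvBLoop_eq (rs : List String) (cs : List (String × String × String)) :
    pvBLoop rs cs =
      (((cs.filter (fun c => rs.all (fun r => PySem.Str.isIn r c.2.2))).head?).map
        (fun c => (c.1, c.2.1))).getD ("", "") := by
  induction rs generalizing cs with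
  | nil =>
    simp only [pvBLoop, List.all_nil, List.filter_true]
    cases cs <;> simp
  | cons r rs ih =>
    simp only [pvBLoop]
    have hff : cs.filter (fun c => (r :: rs).all (fun p => PySem.Str.isIn p c.2.2)) =
        (cs.filter (fun t => PySem.Str.isIn r t.2.2)).filter
          (fun c => rs.all (fun p => PySem.Str.isIn p c.2.2)) := by
      rw [List.filter_filter]
      apply List.filter_congr
      intro a _
      simp [List.all_cons, Bool.and_comm]
    by_cases h : (cs.filter (fun t => PySem.Str.isIn r t.2.2)).isEmpty
    · rw [if_pos h]
      rw [hff]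
      rw [List.isEmpty_iff.mp h]
      simp
    · rw [if_neg h, ih, hff]

-- ===== VERDICT (by name: the statement is the Claim_ definition above) =====
theorem match_function_spec : Claim_equal_match_function := by
  intro regex_list json_data _
  show match_function regex_list json_data = match_function_alt regex_list json_data
  unfold match_function match_function_alt
  rw [pvFindPath_eq, pvBLoop_eq, ← List.head?_filter]
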